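-- pv_equiv track=rewrite | github.com/henry-25/advent_of_code_2015 | 11/bad_password_policy.txt.py | check_and_change_forb_letters
-- ===== SOURCE A (Python) =====
-- def check_and_change_forb_letters(org_string):
--     change_to_a = False
--     curr_ch = 0
--     while curr_ch < len(org_string):
--         if change_to_a:
--             org_string = org_string[:curr_ch] + 'a' + org_string[curr_ch + 1:]
--             curr_ch += 1
--         elif org_string[curr_ch] in ['i', 'o', 'l']:
--             org_string = org_string[:curr_ch] + chr(ord(org_string[curr_ch]) + 1) + org_string[curr_ch + 1:]
--             change_to_a = True
--             curr_ch += 1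
--         else:
--             curr_ch += 1
--     return org_string
-- ===== SOURCE B (Python) =====
-- def check_and_change_forb_letters(org_string):
--     for k, c in enumerate(org_string):
--         if c in 'iol':
--             return org_string[:k] + chr(ord(c) + 1) + 'a' * (len(org_string) - k - 1)
--     return org_string
-- ===== Notes on version B (the rewrite author's own statement) =====
-- stated objective: simpler
-- what changed: A's single interleaved scan with a change_to_a flag and per-position string surgery is replaced by locate-then-build: find the first forbidden letter, then construct the result in one closed-form concatenation using string repetition for the fill, with no fill loop.
import Mathlib
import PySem

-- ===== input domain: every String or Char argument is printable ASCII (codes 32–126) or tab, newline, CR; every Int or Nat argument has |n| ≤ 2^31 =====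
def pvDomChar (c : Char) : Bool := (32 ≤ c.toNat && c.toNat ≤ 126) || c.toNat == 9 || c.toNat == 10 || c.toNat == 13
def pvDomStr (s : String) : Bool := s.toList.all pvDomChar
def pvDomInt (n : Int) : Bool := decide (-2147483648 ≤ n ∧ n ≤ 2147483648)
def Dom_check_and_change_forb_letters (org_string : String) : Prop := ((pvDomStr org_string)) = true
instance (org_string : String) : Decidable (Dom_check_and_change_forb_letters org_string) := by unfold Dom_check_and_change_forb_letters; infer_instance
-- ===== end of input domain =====

-- B replaces A's interleaved scan-and-fill loop (change_to_a flag, per-position string surgery)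
-- by locate-then-build: find the first forbidden letter, then one closed-form concatenation.

-- ===== PORT A =====
-- the while loop of A: state = (current string as chars, index, change_to_a flag)
def pvALoop (cs : List Char) (i : Nat) (flag : Bool) : List Char :=
  if h : i < cs.length then
    if flag then
      pvALoop (cs.take i ++ ['a'] ++ cs.drop (i + 1)) (i + 1) true
    else if cs[i] == 'i' || cs[i] == 'o' || cs[i] == 'l' then
      pvALoop (cs.take i ++ [Char.ofNat (cs[i].toNat + 1)] ++ cs.drop (i + 1)) (i + 1) true
    else
      pvALoop cs (i + 1) flag
  else cs
termination_by cs.length - i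
decreasing_by all_goals simp_all; omega

def check_and_change_forb_letters (org_string : String) : String :=
  String.ofList (pvALoop org_string.toList 0 false)

-- ===== PORT B =====
-- find the split point (the loop over enumerate(org_string)), then build in closed form
def check_and_change_forb_letters_alt (org_string : String) : String :=
  let cs := org_string.toList
  match cs.findIdx? (fun c => c == 'i' || c == 'o' || c == 'l') with
  | none => org_string
  | some k =>
      String.ofList (cs.take k ++ Char.ofNat (cs[k]!.toNat + 1) :: List.replicate (cs.length - k - 1) 'a')

-- ===== PRECONDITION & SPEC =====
def Spec_check_and_change_forb_letters (org_string : String) (out : String) : Prop := out = check_and_change_forb_letters_alt org_string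
instance (org_string : String) (out : String) : Decidable (Spec_check_and_change_forb_letters org_string out) := by unfold Spec_check_and_change_forb_letters; infer_instance

-- ===== CLAIM (what is proved, stated in full; the proofs are below) =====
def Claim_equal_check_and_change_forb_letters : Prop := ∀ (org_string : String), Dom_check_and_change_forb_letters org_string → Spec_check_and_change_forb_letters org_string (check_and_change_forb_letters org_string)

-- ===== LEMMAS AND PROOFS =====

-- ===== VERDICT (by name: the statement is the Claim_ definition above) =====
-- the fill phase: once the flag is set, everything from position i on becomes 'a'
theorem pvALoop_fill (cs : List Char) (i : Nat) :
    pvALoop cs i true = cs.take i ++ List.replicate (cs.length - i) 'a' := by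
  suffices H : ∀ n cs i, cs.length - i ≤ n →
      pvALoop cs i true = cs.take i ++ List.replicate (cs.length - i) 'a' from
    H (cs.length - i) cs i le_rfl
  intro n
  induction n with
  | zero =>
    intro cs i hn
    rw [pvALoop.eq_def, dif_neg (by omega)]
    rw [List.take_of_length_le (by omega), Nat.sub_eq_zero_of_le (by omega)]
    simp
  | succ n ih =>
    intro cs i hn
    by_cases h : i < cs.length
    · rw [pvALoop.eq_def, dif_pos h]
      have hlen : (cs.take i ++ ['a'] ++ cs.drop (i + 1)).length = cs.length := by
        simp; omega
      rw [ih _ _ (by omega)]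
      rw [hlen]
      have htake : (cs.take i ++ ['a'] ++ cs.drop (i + 1)).take (i + 1) = cs.take i ++ ['a'] := by
        exact List.take_left' (by simp; omega)
      rw [htake]
      have hrep : List.replicate (cs.length - i) 'a' = 'a' :: List.replicate (cs.length - (i + 1)) 'a' := by
        rw [show cs.length - i = (cs.length - (i + 1)) + 1 by omega, List.replicate_succ]
      rw [hrep]
      simp
    · rw [pvALoop.eq_def, dif_neg h]
      rw [List.take_of_length_le (by omega), Nat.sub_eq_zero_of_le (by omega)]
      simp

-- the scan phase, characterised via findIdx? on the remaining suffix
theorem pvALoop_scan (cs : List Char) (i : Nat) :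
    pvALoop cs i false =
      match (cs.drop i).findIdx? (fun c => c == 'i' || c == 'o' || c == 'l') with
      | none => cs
      | some j =>
          cs.take (i + j) ++ Char.ofNat (cs[i + j]!.toNat + 1) ::
            List.replicate (cs.length - (i + j) - 1) 'a' := by
  suffices H : ∀ n cs i, cs.length - i ≤ n →
      pvALoop cs i false =
        match (cs.drop i).findIdx? (fun c => c == 'i' || c == 'o' || c == 'l') with
        | none => cs
        | some j =>
            cs.take (i + j) ++ Char.ofNat (cs[i + j]!.toNat + 1) ::
              List.replicate (cs.length - (i + j) - 1) 'a' from
    H (cs.length - i) cs i le_rfl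
  intro n
  induction n with
  | zero =>
    intro cs i hn
    rw [pvALoop.eq_def, dif_neg (by omega)]
    rw [List.drop_of_length_le (by omega)]
    simp
  | succ n ih =>
    intro cs i hn
    by_cases h : i < cs.length
    · rw [List.drop_eq_getElem_cons h, List.findIdx?_cons]
      rw [pvALoop.eq_def, dif_pos h]
      simp only [Bool.false_eq_true, if_false]
      by_cases hf : (cs[i] == 'i' || cs[i] == 'o' || cs[i] == 'l') = true
      · rw [if_pos hf, if_pos hf, pvALoop_fill]
        have hlen : (cs.take i ++ [Char.ofNat (cs[i].toNat + 1)] ++ cs.drop (i + 1)).length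
            = cs.length := by simp; omega
        rw [hlen]
        have htake : (cs.take i ++ [Char.ofNat (cs[i].toNat + 1)] ++ cs.drop (i + 1)).take (i + 1)
            = cs.take i ++ [Char.ofNat (cs[i].toNat + 1)] := by
          exact List.take_left' (by simp; omega)
        rw [htake]
        simp [getElem!_pos, h]
        omega
      · rw [if_neg hf, if_neg hf, ih _ _ (by omega)]
        cases hj : (cs.drop (i + 1)).findIdx? (fun c => c == 'i' || c == 'o' || c == 'l') with
        | none => simp
        | some j =>
          simp only [Option.map_some]
          rw [show i + (j + 1) = i + 1 + j by omega]
    · rw [pvALoop.eq_def, dif_neg h]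
      rw [List.drop_of_length_le (by omega)]
      simp

theorem check_and_change_forb_letters_spec : Claim_equal_check_and_change_forb_letters := by
  intro s _
  unfold Spec_check_and_change_forb_letters check_and_change_forb_letters check_and_change_forb_letters_alt
  rw [pvALoop_scan]
  simp only [List.drop_zero, Nat.zero_add]
  cases h : s.toList.findIdx? (fun c => c == 'i' || c == 'o' || c == 'l') with
  | none => simp [String.ofList_toList]
  | some k => simp
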